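-- pv_equiv track=rewrite | github.com/CMedina02/Compiladosr | analyzer.py | _split_top
-- ===== SOURCE A (Python) =====
-- def _split_top(tokens, seps):
--     out, depth, last = [], 0, 0
--     for i, tk in enumerate(tokens):
--         if tk['lex'] == '(':
--             depth += 1
--         elif tk['lex'] == ')':
--             depth -= 1
--         elif depth == 0 and tk['lex'] in seps:
--             out.append(tokens[last:i])
--             last = i + 1
--     out.append(tokens[last:])
--     return out
-- ===== SOURCE B (Python) =====
-- def _first_cut(tokens, seps):
--     """Index of the first top-level separator token, or None."""
--     depth = 0
--     for i, tk in enumerate(tokens):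
--         lex = tk['lex']
--         if lex == '(':
--             depth += 1
--         elif lex == ')':
--             depth -= 1
--         elif depth == 0 and lex in seps:
--             return i
--     return None
--
--
-- def _split_top(tokens, seps):
--     # Recursive decomposition: peel off the segment before the first
--     # top-level separator and recurse on the remainder.  Correct because
--     # a cut only happens at depth 0, so the depth counter restarts at 0
--     # for the remainder exactly as it would have continued.
--     i = _first_cut(tokens, seps)
--     if i is None:
--         return [tokens]
--     return [tokens[:i]] + _split_top(tokens[i + 1:], seps)
-- ===== Notes on version B (the rewrite author's own statement) =====
-- stated objective: alternative
-- what changed: B is recursive where A is a single iterative pass: a helper finds only the index of the FIRST top-level separator, the head segment is sliced off and the function recurses on the remaining suffix, instead of A's one loop carrying (out, depth, last) state across the whole list.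
import Mathlib
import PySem

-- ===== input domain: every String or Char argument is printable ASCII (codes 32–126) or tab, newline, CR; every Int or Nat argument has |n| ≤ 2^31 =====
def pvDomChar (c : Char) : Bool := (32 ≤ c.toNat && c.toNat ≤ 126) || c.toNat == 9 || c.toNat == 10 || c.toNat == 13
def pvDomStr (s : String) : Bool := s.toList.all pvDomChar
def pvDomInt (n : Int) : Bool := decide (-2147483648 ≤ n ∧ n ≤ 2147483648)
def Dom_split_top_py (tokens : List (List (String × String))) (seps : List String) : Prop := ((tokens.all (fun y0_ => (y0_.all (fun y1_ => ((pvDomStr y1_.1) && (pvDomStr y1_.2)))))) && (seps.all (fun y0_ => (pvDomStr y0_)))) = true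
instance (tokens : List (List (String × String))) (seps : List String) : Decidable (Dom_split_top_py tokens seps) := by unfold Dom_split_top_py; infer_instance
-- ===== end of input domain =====

-- B replaces A's single stateful pass by a recursive decomposition (cut at the first
-- top-level separator, recurse on the suffix); only the return values are compared.

-- ===== PORT A =====
-- tk['lex'] : first-match lookup; Pre_ guarantees the key is present (Python raises KeyError otherwise)
def pvLex (tk : List (String × String)) : String := ((PySem.Dict.mk tk).get? "lex").getD ""

-- one iteration of A's for-loop over enumerate(tokens); state = (out, depth, last)
def pvStepA (tokens : List (List (String × String))) (seps : List String)
    (st : List (List (List (String × String))) × Int × Int)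
    (p : Int × List (String × String)) : List (List (List (String × String))) × Int × Int :=
  if pvLex p.2 = "(" then (st.1, st.2.1 + 1, st.2.2)
  else if pvLex p.2 = ")" then (st.1, st.2.1 - 1, st.2.2)
  else if st.2.1 = 0 ∧ pvLex p.2 ∈ seps then
    (st.1 ++ [PySem.List.slice tokens (some st.2.2) (some p.1)], st.2.1, p.1 + 1)
  else st

def split_top_py (tokens : List (List (String × String))) (seps : List String) :
    List (List (List (String × String))) :=
  let fin := (PySem.List.enumerate tokens 0).foldl (pvStepA tokens seps) ([], 0, 0)
  fin.1 ++ [PySem.List.slice tokens (some fin.2.2) none]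

-- ===== PORT B =====
-- _first_cut: index of the first top-level separator, or none; (depth, running index) as in Source B
def pvFirstCut (seps : List String) :
    List (List (String × String)) → Int → Int → Option Int
  | [], _, _ => none
  | tk :: ts, d, i =>
    if pvLex tk = "(" then pvFirstCut seps ts (d + 1) (i + 1)
    else if pvLex tk = ")" then pvFirstCut seps ts (d - 1) (i + 1)
    else if d = 0 ∧ pvLex tk ∈ seps then some i
    else pvFirstCut seps ts d (i + 1)

-- Source B's recursion, made total with a fuel bound (each call strictly shortens the list,
-- so fuel = tokens.length always suffices; the fuel-0 branch is never reached)
def pvSplitRec (seps : List String) :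
    Nat → List (List (String × String)) → List (List (List (String × String)))
  | 0, ts => [ts]
  | Nat.succ n, ts =>
    match pvFirstCut seps ts 0 0 with
    | none => [ts]
    | some i =>
      PySem.List.slice ts none (some i) :: pvSplitRec seps n (PySem.List.slice ts (some (i + 1)) none)

def split_top_py_alt (tokens : List (List (String × String))) (seps : List String) :
    List (List (List (String × String))) :=
  pvSplitRec seps tokens.length tokens

-- ===== PRECONDITION & SPEC =====
-- Pre_ excludes exactly the inputs on which Python A raises KeyError: a token dict without the key "lex"
def Pre_split_top_py (tokens : List (List (String × String))) (seps : List String) : Prop :=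
  ∀ tk ∈ tokens, (PySem.Dict.mk tk).contains "lex" = true
instance (tokens : List (List (String × String))) (seps : List String) : Decidable (Pre_split_top_py tokens seps) := by unfold Pre_split_top_py; infer_instance

def pvWitness_split_top_py : (List (List (String × String))) × List String :=
  ([[("lex", "a")], [("lex", ",")], [("lex", "b")]], [","])

def Spec_split_top_py (tokens : List (List (String × String))) (seps : List String) (out : List (List (List (String × String)))) : Prop := out = split_top_py_alt tokens seps
instance (tokens : List (List (String × String))) (seps : List String) (out : List (List (List (String × String)))) : Decidable (Spec_split_top_py tokens seps out) := by unfold Spec_split_top_py; infer_instance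

-- ===== CLAIM (what is proved, stated in full; the proofs are below) =====
def Claim_equal_split_top_py : Prop := ∀ (tokens : List (List (String × String))) (seps : List String), Dom_split_top_py tokens seps → Pre_split_top_py tokens seps → Spec_split_top_py tokens seps (split_top_py tokens seps)

-- ===== LEMMAS AND PROOFS =====

-- proof-only helper: one iteration of an index-collecting pass mirroring A's loop (cuts, depth)
def pvStepB (seps : List String) (st : List Int × Int)
    (p : Int × List (String × String)) : List Int × Int :=
  if pvLex p.2 = "(" then (st.1, st.2 + 1)
  else if pvLex p.2 = ")" then (st.1, st.2 - 1)
  else if st.2 = 0 ∧ pvLex p.2 ∈ seps then (st.1 ++ [p.1], st.2)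
  else st

-- the list of top-level separator indices of ts, scanned from depth d with indices from i0
def pvCuts (seps : List String) (ts : List (List (String × String))) (d i0 : Int) : List Int :=
  ((PySem.List.enumerate ts i0).foldl (pvStepB seps) ([], d)).1

-- slicing tokens between consecutive boundaries (-1) :: cuts ++ [len]
def pvBnd (tokens : List (List (String × String))) (cuts : List Int) :
    List (List (List (String × String))) :=
  let bds := (-1 : Int) :: cuts ++ [(tokens.length : Int)]
  (bds.zip bds.tail).map (fun q => PySem.List.slice tokens (some (q.1 + 1)) (some q.2))

-- the index-collecting pass threads its accumulator
lemma pvStepB_fold_acc (seps : List String) (es : List (Int × List (String × String))) :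
    ∀ (acc : List Int) (d : Int),
      es.foldl (pvStepB seps) (acc, d)
        = (acc ++ (es.foldl (pvStepB seps) ([], d)).1, (es.foldl (pvStepB seps) ([], d)).2) := by
  induction es with
  | nil => intro acc d; simp
  | cons p es ih =>
    intro acc d
    simp only [List.foldl_cons, pvStepB]
    split_ifs with h1 h2 h3
    · exact ih acc (d + 1)
    · exact ih acc (d - 1)
    · rw [ih (acc ++ [p.1]) d, List.nil_append, ih [p.1] d]; simp
    · exact ih acc d

-- consecutive-pairs walk of a boundary list with at least two elements
lemma pvPairs_cons (a b : Int) (l : List Int) :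
    ((a :: b :: l).zip (a :: b :: l).tail) = (a, b) :: ((b :: l).zip (b :: l).tail) := rfl

-- the invariant tying A's running (out, depth, last) to the cut table
lemma pv_key (tokens : List (List (String × String))) (seps : List String) :
    ∀ (es : List (Int × List (String × String))) (d last : Int)
      (out : List (List (List (String × String)))),
      0 ≤ last → (∀ p ∈ es, 0 ≤ p.1) →
      (es.foldl (pvStepA tokens seps) (out, d, last)).1
          ++ [PySem.List.slice tokens (some (es.foldl (pvStepA tokens seps) (out, d, last)).2.2) none]
        = out ++ (((last - 1) :: (es.foldl (pvStepB seps) ([], d)).1 ++ [(tokens.length : Int)]).zip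
              ((last - 1) :: (es.foldl (pvStepB seps) ([], d)).1 ++ [(tokens.length : Int)]).tail).map
            (fun q => PySem.List.slice tokens (some (q.1 + 1)) (some q.2)) := by
  intro es
  induction es with
  | nil =>
    intro d last out hlast _
    have h1 : last - 1 + 1 = last := by omega
    simp only [List.foldl_nil, List.nil_append, List.cons_append,
      List.zip_cons_cons, List.tail_cons, List.zip_nil_right, List.map_cons, List.map_nil, h1]
    rw [PySem.List.slice_from tokens hlast,
      PySem.List.slice_toNat tokens hlast (by positivity : (0:Int) ≤ (tokens.length : Int))]
    rw [List.take_of_length_le (by simp)]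
  | cons p es ih =>
    intro d last out hlast hpos
    simp only [List.foldl_cons, pvStepA, pvStepB]
    split_ifs with h1 h2 h3
    · exact ih (d + 1) last out hlast (fun q hq => hpos q (List.mem_cons_of_mem _ hq))
    · exact ih (d - 1) last out hlast (fun q hq => hpos q (List.mem_cons_of_mem _ hq))
    · have hp : 0 ≤ p.1 := hpos p List.mem_cons_self
      rw [ih d (p.1 + 1) (out ++ [PySem.List.slice tokens (some last) (some p.1)]) (by omega)
        (fun q hq => hpos q (List.mem_cons_of_mem _ hq))]
      rw [List.nil_append, pvStepB_fold_acc seps es [p.1] d]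
      have e1 : last - 1 + 1 = last := by omega
      have e2 : p.1 + 1 - 1 = p.1 := by omega
      simp only [List.cons_append, pvPairs_cons, List.map_cons, e1, e2,
        List.append_assoc, List.nil_append]
    · exact ih d last out hlast (fun q hq => hpos q (List.mem_cons_of_mem _ hq))

-- first-cut index bounds
lemma pvFirstCut_some_bounds (seps : List String) :
    ∀ (ts : List (List (String × String))) (d i0 j : Int),
      pvFirstCut seps ts d i0 = some j → i0 ≤ j ∧ j < i0 + ts.length := by
  intro ts
  induction ts with
  | nil => intro d i0 j h; simp [pvFirstCut] at h
  | cons tk ts ih =>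
    intro d i0 j h
    simp only [pvFirstCut] at h
    split_ifs at h with h1 h2 h3
    · have := ih (d + 1) (i0 + 1) j h; simp at this ⊢; omega
    · have := ih (d - 1) (i0 + 1) j h; simp at this ⊢; omega
    · injection h with h
      subst h
      constructor
      · omega
      · have hlen : (0:Nat) < (tk :: ts).length := by simp
        omega
    · have := ih d (i0 + 1) j h; simp at this ⊢; omega

-- no cut found ⇒ the cut table is empty
lemma pvCuts_none (seps : List String) :
    ∀ (ts : List (List (String × String))) (d i0 : Int),
      pvFirstCut seps ts d i0 = none → pvCuts seps ts d i0 = [] := by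
  intro ts
  induction ts with
  | nil => intro d i0 _; simp [pvCuts]
  | cons tk ts ih =>
    intro d i0 h
    simp only [pvFirstCut] at h
    simp only [pvCuts, PySem.List.enumerate_cons, List.foldl_cons, pvStepB]
    split_ifs at h ⊢ with h1 h2 h3
    · exact ih (d + 1) (i0 + 1) h
    · exact ih (d - 1) (i0 + 1) h
    · exact ih d (i0 + 1) h

-- first cut at j ⇒ the cut table starts with j and continues past position j
lemma pvCuts_some (seps : List String) :
    ∀ (ts : List (List (String × String))) (d i0 j : Int),
      pvFirstCut seps ts d i0 = some j →
      pvCuts seps ts d i0 = j :: pvCuts seps (ts.drop (j + 1 - i0).toNat) 0 (j + 1) := by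
  intro ts
  induction ts with
  | nil => intro d i0 j h; simp [pvFirstCut] at h
  | cons tk ts ih =>
    intro d i0 j h
    simp only [pvFirstCut] at h
    simp only [pvCuts, PySem.List.enumerate_cons, List.foldl_cons, pvStepB]
    split_ifs at h ⊢ with h1 h2 h3
    · have hb := pvFirstCut_some_bounds seps ts (d + 1) (i0 + 1) j h
      have e : (j + 1 - i0).toNat = (j + 1 - (i0 + 1)).toNat + 1 := by omega
      rw [e, List.drop_succ_cons]
      exact ih (d + 1) (i0 + 1) j h
    · have hb := pvFirstCut_some_bounds seps ts (d - 1) (i0 + 1) j h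
      have e : (j + 1 - i0).toNat = (j + 1 - (i0 + 1)).toNat + 1 := by omega
      rw [e, List.drop_succ_cons]
      exact ih (d - 1) (i0 + 1) j h
    · injection h with h
      subst h
      have e : (i0 + 1 - i0).toNat = 1 := by omega
      rw [e]
      obtain ⟨hd, _⟩ := h3
      subst hd
      simp only [List.nil_append, List.drop_succ_cons, List.drop_zero]
      rw [pvStepB_fold_acc seps _ [i0] 0]
      simp
    · have hb := pvFirstCut_some_bounds seps ts d (i0 + 1) j h
      have e : (j + 1 - i0).toNat = (j + 1 - (i0 + 1)).toNat + 1 := by omega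
      rw [e, List.drop_succ_cons]
      exact ih d (i0 + 1) j h

-- shifting the index origin shifts every collected cut
lemma pvCuts_shift (seps : List String) :
    ∀ (ts : List (List (String × String))) (d i0 k : Int),
      pvCuts seps ts d (i0 + k) = (pvCuts seps ts d i0).map (· + k) := by
  intro ts
  induction ts with
  | nil => intro d i0 k; simp [pvCuts]
  | cons tk ts ih =>
    intro d i0 k
    simp only [pvCuts, PySem.List.enumerate_cons, List.foldl_cons, pvStepB]
    split_ifs with h1 h2 h3
    · have := ih (d + 1) (i0 + 1) k
      simp only [pvCuts] at this
      rw [show i0 + k + 1 = i0 + 1 + k by ring, this]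
    · have := ih (d - 1) (i0 + 1) k
      simp only [pvCuts] at this
      rw [show i0 + k + 1 = i0 + 1 + k by ring, this]
    · simp only [List.nil_append]
      rw [pvStepB_fold_acc seps _ [i0 + k] d, pvStepB_fold_acc seps _ [i0] d]
      have := ih d (i0 + 1) k
      simp only [pvCuts] at this
      rw [show i0 + k + 1 = i0 + 1 + k by ring, this]
      simp
    · have := ih d (i0 + 1) k
      simp only [pvCuts] at this
      rw [show i0 + k + 1 = i0 + 1 + k by ring, this]

-- every cut collected from origin i0 is ≥ i0
lemma pvCuts_nonneg (seps : List String) :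
    ∀ (ts : List (List (String × String))) (d i0 : Int),
      ∀ x ∈ pvCuts seps ts d i0, i0 ≤ x := by
  intro ts
  induction ts with
  | nil => intro d i0 x hx; simp [pvCuts] at hx
  | cons tk ts ih =>
    intro d i0 x hx
    simp only [pvCuts, PySem.List.enumerate_cons, List.foldl_cons, pvStepB] at hx
    split_ifs at hx with h1 h2 h3
    · have := ih (d + 1) (i0 + 1) x hx; omega
    · have := ih (d - 1) (i0 + 1) x hx; omega
    · simp only [List.nil_append] at hx
      rw [pvStepB_fold_acc seps _ [i0] d] at hx
      simp only [List.cons_append, List.nil_append, List.mem_cons] at hx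
      rcases hx with h | h
      · omega
      · have := ih d (i0 + 1) x h; omega
    · have := ih d (i0 + 1) x hx; omega

-- pointwise: slicing a k-shifted boundary pair of tokens is slicing the unshifted pair of tokens.drop k
lemma pvShiftPairs (tokens : List (List (String × String))) (k : Int) (hk : 0 ≤ k)
    (bds : List Int) (h1 : ∀ x ∈ bds, -1 ≤ x) (h2 : ∀ x ∈ bds.tail, 0 ≤ x) :
    ((bds.map (· + k)).zip (bds.map (· + k)).tail).map
        (fun q => PySem.List.slice tokens (some (q.1 + 1)) (some q.2))
      = (bds.zip bds.tail).map
        (fun q => PySem.List.slice (tokens.drop k.toNat) (some (q.1 + 1)) (some q.2)) := by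
  rw [show (bds.map (· + k)).tail = bds.tail.map (· + k) by cases bds <;> simp]
  rw [List.zip_map, List.map_map]
  apply List.map_congr_left
  intro q hq
  obtain ⟨hq1, hq2⟩ := List.of_mem_zip hq
  have ha : -1 ≤ q.1 := h1 _ hq1
  have hb : 0 ≤ q.2 := h2 _ hq2
  simp only [Prod.map, Function.comp]
  rw [PySem.List.slice_toNat _ (by omega : (0:Int) ≤ q.1 + k + 1) (by omega : (0:Int) ≤ q.2 + k),
    PySem.List.slice_toNat _ (by omega : (0:Int) ≤ q.1 + 1) hb, List.drop_drop]
  have e1 : k.toNat + (q.1 + 1).toNat = (q.1 + k + 1).toNat := by omega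
  have e2 : (q.2 + k).toNat - (q.1 + k + 1).toNat = q.2.toNat - (q.1 + 1).toNat := by omega
  rw [e1, e2]

-- boundary slicing commutes with cutting off the head segment at position j
lemma pvBnd_shift (tokens : List (List (String × String))) (j : Int) (cs : List Int)
    (hj0 : 0 ≤ j) (hjlen : j < tokens.length) (hcs : ∀ x ∈ cs, 0 ≤ x) :
    pvBnd tokens (j :: cs.map (· + (j + 1)))
      = PySem.List.slice tokens none (some j) :: pvBnd (tokens.drop (j + 1).toNat) cs := by
  have hk : (0:Int) ≤ j + 1 := by omega
  have hlen : ((tokens.length - (j + 1).toNat : Nat) : Int) + (j + 1) = (tokens.length : Int) := by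
    omega
  simp only [pvBnd, List.length_drop, List.cons_append, List.tail_cons, List.zip_cons_cons,
    List.map_cons]
  congr 1
  have hmap : (j :: (List.map (fun x => x + (j + 1)) cs ++ [(tokens.length : Int)]))
      = List.map (fun x => x + (j + 1))
        ((-1 : Int) :: cs ++ [((tokens.length - (j + 1).toNat : Nat) : Int)]) := by
    simp [hlen]
  have hzip : (j :: (List.map (fun x => x + (j + 1)) cs ++ [(tokens.length : Int)])).zip
      (List.map (fun x => x + (j + 1)) cs ++ [(tokens.length : Int)])
    = (List.map (fun x => x + (j + 1)) ((-1 : Int) :: cs ++ [((tokens.length - (j + 1).toNat : Nat) : Int)])).zip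
      (List.map (fun x => x + (j + 1)) ((-1 : Int) :: cs ++ [((tokens.length - (j + 1).toNat : Nat) : Int)])).tail := by
    rw [hmap]
    rw [show (List.map (fun x => x + (j + 1))
          ((-1 : Int) :: cs ++ [((tokens.length - (j + 1).toNat : Nat) : Int)])).tail
        = List.map (fun x => x + (j + 1)) cs
            ++ [((tokens.length - (j + 1).toNat : Nat) : Int) + (j + 1)] by simp]
    rw [hlen]
  rw [hzip,
    pvShiftPairs tokens (j + 1) hk ((-1 : Int) :: cs ++ [((tokens.length - (j + 1).toNat : Nat) : Int)])
    (by intro x hx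
        simp at hx
        rcases hx with h | h | h
        · omega
        · have := hcs _ h; omega
        · omega)
    (by intro x hx
        simp at hx
        rcases hx with h | h
        · have := hcs _ h; omega
        · omega)]
  rfl

-- empty cut table ⇒ boundary slicing yields the whole list
lemma pvBnd_nil (tokens : List (List (String × String))) : pvBnd tokens [] = [tokens] := by
  unfold pvBnd
  simp only [List.nil_append, List.cons_append, pvPairs_cons]
  simp [PySem.List.slice_to_natCast]

-- the main bridge: boundary slicing of the cut table equals Source B's recursion
lemma pv_main (seps : List String) :
    ∀ (n : Nat) (ts : List (List (String × String))), ts.length ≤ n →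
      pvBnd ts (pvCuts seps ts 0 0) = pvSplitRec seps n ts := by
  intro n
  induction n with
  | zero =>
    intro ts hts
    have : ts = [] := List.eq_nil_of_length_eq_zero (by omega)
    subst this
    simp [pvCuts, pvSplitRec, pvBnd_nil]
  | succ n ih =>
    intro ts hts
    cases h : pvFirstCut seps ts 0 0 with
    | none =>
      rw [pvCuts_none seps ts 0 0 h, pvBnd_nil]
      simp [pvSplitRec, h]
    | some j =>
      rw [show pvSplitRec seps (n + 1) ts
            = PySem.List.slice ts none (some j)
              :: pvSplitRec seps n (PySem.List.slice ts (some (j + 1)) none) by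
        simp [pvSplitRec, h]]
      obtain ⟨hj0, hjlen⟩ := pvFirstCut_some_bounds seps ts 0 0 j h
      rw [pvCuts_some seps ts 0 0 j h]
      have e : (j + 1 - 0 : Int) = j + 1 := by ring
      rw [e]
      have hshift : pvCuts seps (ts.drop (j + 1).toNat) 0 (j + 1)
          = (pvCuts seps (ts.drop (j + 1).toNat) 0 0).map (· + (j + 1)) := by
        have := pvCuts_shift seps (ts.drop (j + 1).toNat) 0 0 (j + 1)
        simpa using this
      rw [hshift]
      rw [pvBnd_shift ts j _ hj0 (by simpa using hjlen)
        (fun x hx => pvCuts_nonneg seps _ 0 0 x hx)]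
      congr 1
      rw [PySem.List.slice_from ts (by omega : (0:Int) ≤ j + 1)]
      apply ih
      simp only [List.length_drop]
      omega

-- ===== VERDICT (by name: the statement is the Claim_ definition above) =====
theorem split_top_py_spec : Claim_equal_split_top_py := by
  intro tokens seps _ _
  unfold Spec_split_top_py split_top_py split_top_py_alt
  have hpos : ∀ p ∈ PySem.List.enumerate tokens 0, 0 ≤ p.1 := by
    intro p hp
    obtain ⟨k, hk, hpk⟩ := (PySem.List.mem_enumerate_iff _ _ _).1 hp
    simp [hpk]
  have h := pv_key tokens seps (PySem.List.enumerate tokens 0) 0 0 [] (le_refl 0) hpos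
  rw [← pv_main seps tokens.length tokens (le_refl _)]
  exact h
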